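-- pv_equiv track=rewrite | github.com/ndkim11/Algorithms | 백준/Gold/1407. 2로 몇 번 나누어질까/2로 몇 번 나누어질까.py | func
-- ===== SOURCE A (Python) =====
-- def func(A):
--     i = 1
--     sum = A
--     while(A>0):
--         sum += (A//2)*(2**i - int(2**(i-1)))
--         A = A//2
--         i += 1
--     return sum
-- ===== SOURCE B (Python) =====
-- def func(A):
--     # g(a) = sum_{k>=1} (a // 2**k) * 2**(k-1), via g(a) = a//2 + 2*g(a//2)
--     def g(a):
--         if a <= 0:
--             return 0
--         h = a // 2
--         return h + 2 * g(h)
--     return A + g(A)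
-- ===== Notes on version B (the rewrite author's own statement) =====
-- stated objective: alternative
-- what changed: Replaces the while loop that tracks a running power index i and accumulates (A//2)*(2**i - 2**(i-1)) with a direct recursion g(a) = a//2 + 2*g(a//2) (g(a)=0 for a<=0) and returns A + g(A), eliminating the index and the power computations.
import Mathlib
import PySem

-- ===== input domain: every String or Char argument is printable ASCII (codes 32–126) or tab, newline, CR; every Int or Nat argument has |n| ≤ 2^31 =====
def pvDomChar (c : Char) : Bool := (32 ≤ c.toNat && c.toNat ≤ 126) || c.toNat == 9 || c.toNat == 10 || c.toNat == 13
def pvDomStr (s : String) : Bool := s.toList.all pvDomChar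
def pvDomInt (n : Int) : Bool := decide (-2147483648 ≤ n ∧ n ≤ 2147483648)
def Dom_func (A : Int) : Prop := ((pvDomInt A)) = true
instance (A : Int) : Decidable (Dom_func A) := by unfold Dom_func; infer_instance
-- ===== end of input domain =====

-- B replaces A's indexed-power while loop by the recursion g(a) = a//2 + 2*g(a//2), returning A + g(A); alternative decomposition, same cost.

-- ===== PORT A =====
-- while(A>0): sum += (A//2)*(2**i - 2**(i-1)); A = A//2; i += 1
def funcLoop (A sum i : Int) : Int :=
  if h : A > 0 then
    funcLoop (PySem.Int.floordiv A 2)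
      (sum + (PySem.Int.floordiv A 2) * (2 ^ i.toNat - 2 ^ (i - 1).toNat))
      (i + 1)
  else sum
termination_by A.toNat
decreasing_by
  have := PySem.Int.floordiv_eq_ediv_of_pos (a := A) (b := 2) (by omega)
  rw [this]
  omega

def func (A : Int) : Int := funcLoop A A 1

-- ===== PORT B =====
def funcG (a : Int) : Int :=
  if h : a ≤ 0 then 0
  else PySem.Int.floordiv a 2 + 2 * funcG (PySem.Int.floordiv a 2)
termination_by a.toNat
decreasing_by
  have := PySem.Int.floordiv_eq_ediv_of_pos (a := a) (b := 2) (by omega)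
  rw [this]
  omega

def func_alt (A : Int) : Int := A + funcG A

-- ===== PRECONDITION & SPEC =====
def Spec_func (A : Int) (out : Int) : Prop := out = func_alt A
instance (A : Int) (out : Int) : Decidable (Spec_func A out) := by unfold Spec_func; infer_instance

-- ===== CLAIM (what is proved, stated in full; the proofs are below) =====
def Claim_equal_func : Prop := ∀ (A : Int), Dom_func A → Spec_func A (func A)

-- ===== LEMMAS AND PROOFS =====

-- Loop invariant: for i ≥ 1, the loop adds 2^(i-1) · g(A) to the accumulator.
theorem funcLoop_eq_g (n : Nat) (A sum i : Int) (hA : A.toNat ≤ n) (hi : 1 ≤ i) :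
    funcLoop A sum i = sum + 2 ^ (i - 1).toNat * funcG A := by
  induction n generalizing A sum i with
  | zero =>
      have hA0 : A ≤ 0 := by omega
      rw [funcLoop, funcG]
      simp [hA0, not_lt.mpr hA0]
  | succ n ih =>
      by_cases hpos : A > 0
      · have hfd : PySem.Int.floordiv A 2 = A / 2 :=
          PySem.Int.floordiv_eq_ediv_of_pos (by omega)
        rw [funcLoop, funcG]
        simp only [hpos, not_le.mpr hpos, dif_pos, dif_neg, not_false_iff]
        rw [ih _ _ _ (by rw [hfd]; omega) (by omega)]
        have h1 : (i + 1 - 1).toNat = i.toNat := by omega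
        have h2 : i.toNat = (i - 1).toNat + 1 := by omega
        rw [h1, h2]
        ring
      · rw [funcLoop, funcG]
        simp [hpos, (by omega : A ≤ 0)]

-- ===== VERDICT (by name: the statement is the Claim_ definition above) =====
theorem func_spec : Claim_equal_func := by
  intro A _
  unfold Spec_func func func_alt
  rw [funcLoop_eq_g A.toNat A A 1 le_rfl (by norm_num)]
  simp
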